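-- pv_equiv track=rewrite | github.com/krtxt/ShadowObj2Points | src/datamodules/HandEncoderDataModule.py | _build_unique_names_and_primary_map
-- ===== SOURCE A (Python) =====
-- from typing import Any, Dict, List, Optional, Tuple
-- from collections import defaultdict
--
-- def _build_unique_names_and_primary_map(
--     link_to_unique: Dict[str, List[int]],
--     link_order: List[str],
-- ) -> Tuple[List[str], Dict[int, str]]:
--     """
--     Select a primary link name for each unique index using suffix-priority,
--     so that e.g. '*middle' wins over '*proximal' when the same unique point
--     is shared by multiple links. This matches the notebook behavior.
--     """
--     if not link_to_unique:
--         return [], {}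
--
--     # Count unique points
--     N = 0
--     for idxs in link_to_unique.values():
--         if not idxs:
--             continue
--         N = max(N, max(int(i) for i in idxs) + 1)
--
--     # Build candidates per unique id
--     unique_to_links: Dict[int, List[str]] = defaultdict(list)
--     for lk, idxs in link_to_unique.items():
--         for u in idxs:
--             unique_to_links[int(u)].append(lk)
--
--     # Suffix priority (lower is stronger)
--     SUFFIX_PRIORITY = {
--         'middle': 0,
--         'proximal': 1,
--         'knuckle': 2,
--         'metacarpal': 3,
--         'base': 4,
--         'hub': 5,
--         'palm': 6,
--         'wrist': 7,
--         'forearm': 8,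
--         'distal': 9,
--         'tip': 10,
--     }
--
--     def suffix_priority(lk: str) -> int:
--         for suf, pr in SUFFIX_PRIORITY.items():
--             if lk.endswith(suf):
--                 return pr
--         return 100
--
--     # Choose primary by priority
--     primary: Dict[int, str] = {}
--     for u in range(N):
--         cands = unique_to_links.get(u, [])
--         if not cands:
--             primary[u] = 'unknown'
--         else:
--             primary[u] = min(cands, key=suffix_priority)
--
--     # Assign names with running counters
--     names: List[Optional[str]] = [None] * N
--     counters: Dict[str, int] = defaultdict(int)
--     for u in range(N):
--         lk = primary[u]
--         k = counters[lk]
--         names[u] = f"{lk}_{k}"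
--         counters[lk] += 1
--
--     return [n if n is not None else f"u{i}" for i, n in enumerate(names)], primary
-- ===== SOURCE B (Python) =====
-- from typing import Dict, List, Tuple
--
--
-- def _build_unique_names_and_primary_map(
--     link_to_unique: Dict[str, List[int]],
--     link_order: List[str],
-- ) -> Tuple[List[str], Dict[int, str]]:
--     """One pass over the items: track the best (lowest-priority) link per
--     unique index directly, instead of collecting candidate lists and
--     running min over each."""
--     if not link_to_unique:
--         return [], {}
--
--     SUFFIX_PRIORITY = {
--         'middle': 0,
--         'proximal': 1,
--         'knuckle': 2,
--         'metacarpal': 3,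
--         'base': 4,
--         'hub': 5,
--         'palm': 6,
--         'wrist': 7,
--         'forearm': 8,
--         'distal': 9,
--         'tip': 10,
--     }
--
--     def suffix_priority(lk: str) -> int:
--         for suf, pr in SUFFIX_PRIORITY.items():
--             if lk.endswith(suf):
--                 return pr
--         return 100
--
--     N = 0
--     best: Dict[int, int] = {}
--     prim: Dict[int, str] = {}
--     for lk, idxs in link_to_unique.items():
--         if idxs:
--             N = max(N, max(int(i) for i in idxs) + 1)
--         p = suffix_priority(lk)
--         for u in idxs:
--             ui = int(u)
--             if ui not in best or p < best[ui]:
--                 best[ui] = p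
--                 prim[ui] = lk
--
--     primary = {u: prim.get(u, 'unknown') for u in range(N)}
--
--     names: List[str] = []
--     counters: Dict[str, int] = {}
--     for u in range(N):
--         lk = primary[u]
--         k = counters.get(lk, 0)
--         names.append(f"{lk}_{k}")
--         counters[lk] = k + 1
--
--     return names, primary
-- ===== Notes on version B (the rewrite author's own statement) =====
-- stated objective: alternative
-- what changed: Replaces the intermediate dict of per-index candidate lists plus a min(..., key=suffix_priority) pass with a single pass over the items that maintains best-priority and primary dicts per index (strict-less update preserves min's first-wins tie-breaking) and fuses the N computation into the same loop, so no candidate lists are materialised and no second min scan runs.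
import Mathlib
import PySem

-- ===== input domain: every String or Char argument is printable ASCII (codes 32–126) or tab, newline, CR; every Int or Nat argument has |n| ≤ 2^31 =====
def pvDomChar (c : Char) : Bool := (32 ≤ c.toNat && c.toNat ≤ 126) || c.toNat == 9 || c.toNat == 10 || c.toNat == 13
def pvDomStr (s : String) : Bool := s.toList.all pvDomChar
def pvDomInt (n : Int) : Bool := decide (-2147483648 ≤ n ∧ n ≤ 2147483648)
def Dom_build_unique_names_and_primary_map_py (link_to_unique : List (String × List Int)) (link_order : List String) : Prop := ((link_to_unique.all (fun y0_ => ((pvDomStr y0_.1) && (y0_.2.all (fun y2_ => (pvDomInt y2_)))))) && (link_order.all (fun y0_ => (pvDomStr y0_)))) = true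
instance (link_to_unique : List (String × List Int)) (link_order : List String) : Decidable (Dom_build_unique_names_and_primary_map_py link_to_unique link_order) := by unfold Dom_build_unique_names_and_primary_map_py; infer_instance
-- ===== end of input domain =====

-- B replaces the per-index candidate-list dict + min(..., key=suffix_priority) with a single
-- pass that keeps the best priority and primary link per index (strict-less update = min's
-- first-wins tie-break); same results, no speed claim.

-- ===== PORT A =====

-- suffix_priority: the dict is only iterated in insertion order, so it is the if-chain
def pvSufPriority (lk : String) : Int :=
  if PySem.Str.endswith lk "middle" then 0
  else if PySem.Str.endswith lk "proximal" then 1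
  else if PySem.Str.endswith lk "knuckle" then 2
  else if PySem.Str.endswith lk "metacarpal" then 3
  else if PySem.Str.endswith lk "base" then 4
  else if PySem.Str.endswith lk "hub" then 5
  else if PySem.Str.endswith lk "palm" then 6
  else if PySem.Str.endswith lk "wrist" then 7
  else if PySem.Str.endswith lk "forearm" then 8
  else if PySem.Str.endswith lk "distal" then 9
  else if PySem.Str.endswith lk "tip" then 10
  else 100

-- max(int(i) for i in idxs) on a nonempty idxs (int() is the identity on ints); [] unreachable (guarded)
def pvMaxOf : List Int → Int
  | [] => 0
  | i :: t => t.foldl max i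

def build_unique_names_and_primary_map_py (link_to_unique : List (String × List Int)) (link_order : List String) : List String × (List (Int × String)) :=
  if link_to_unique = [] then ([], []) else
  let N : Int := link_to_unique.foldl
    (fun N p => if p.2 = [] then N else max N (pvMaxOf p.2 + 1)) 0
  -- unique_to_links[int(u)].append(lk) on a defaultdict(list) is modify with default []
  let utl : PySem.Dict Int (List String) := link_to_unique.foldl
    (fun d p => p.2.foldl (fun d u => d.modify u [] (· ++ [p.1])) d) PySem.Dict.empty
  let primary : PySem.Dict Int String := (PySem.List.pyRange 0 N 1).foldl
    (fun pr u =>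
      let cands := utl.getD u []
      if cands = [] then pr.insert u "unknown"
      else pr.insert u ((PySem.List.min? cands pvSufPriority).getD "unknown")) PySem.Dict.empty
  -- names[u] is assigned for every u of range(N) in ascending order, so the [None]*N buffer
  -- is built by appending; primary[u] always hits a key (default never read);
  -- counters[lk] on defaultdict(int) inserts 0, the += 1 then overwrites in place:
  -- net effect = insert (k+1) at the same position
  let st := (PySem.List.pyRange 0 N 1).foldl
    (fun (st : List (Option String) × PySem.Dict String Int) u =>
      let lk := primary.getD u "unknown"
      let k := st.2.getD lk 0
      (st.1 ++ [some (lk ++ "_" ++ PySem.Int.toStr k)], st.2.insert lk (k + 1)))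
    ([], PySem.Dict.empty)
  ((PySem.List.enumerate st.1).map
      (fun p => match p.2 with | some n => n | none => "u" ++ PySem.Int.toStr p.1),
   primary.items)

-- ===== PORT B =====
def build_unique_names_and_primary_map_py_alt (link_to_unique : List (String × List Int)) (link_order : List String) : List String × (List (Int × String)) :=
  if link_to_unique = [] then ([], []) else
  -- one pass: fused N plus (best, prim) dicts; 'ui not in best or p < best[ui]' is the get? match
  let acc := link_to_unique.foldl
    (fun (acc : Int × (PySem.Dict Int Int × PySem.Dict Int String)) p =>
      ((if p.2 = [] then acc.1 else max acc.1 (pvMaxOf p.2 + 1)),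
       (let pr := pvSufPriority p.1
        p.2.foldl
          (fun (bp : PySem.Dict Int Int × PySem.Dict Int String) u =>
            match bp.1.get? u with
            | none => (bp.1.insert u pr, bp.2.insert u p.1)
            | some b0 => if pr < b0 then (bp.1.insert u pr, bp.2.insert u p.1) else bp)
          acc.2)))
    (0, (PySem.Dict.empty, PySem.Dict.empty))
  let N := acc.1
  let prim := acc.2.2
  -- dict comprehension over range(N): the keys are distinct, so it is the Dict of the mapped list
  let primary : PySem.Dict Int String :=
    PySem.Dict.mk ((PySem.List.pyRange 0 N 1).map (fun u => (u, prim.getD u "unknown")))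
  let st := (PySem.List.pyRange 0 N 1).foldl
    (fun (st : List String × PySem.Dict String Int) u =>
      let lk := primary.getD u "unknown"
      let k := st.2.getD lk 0
      (st.1 ++ [lk ++ "_" ++ PySem.Int.toStr k], st.2.insert lk (k + 1)))
    ([], PySem.Dict.empty)
  (st.1, primary.items)

-- ===== PRECONDITION & SPEC =====
def Spec_build_unique_names_and_primary_map_py (link_to_unique : List (String × List Int)) (link_order : List String) (out : List String × (List (Int × String))) : Prop := out = build_unique_names_and_primary_map_py_alt link_to_unique link_order
instance (link_to_unique : List (String × List Int)) (link_order : List String) (out : List String × (List (Int × String))) : Decidable (Spec_build_unique_names_and_primary_map_py link_to_unique link_order out) := by unfold Spec_build_unique_names_and_primary_map_py; infer_instance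

-- ===== CLAIM (what is proved, stated in full; the proofs are below) =====
def Claim_equal_build_unique_names_and_primary_map_py : Prop := ∀ (link_to_unique : List (String × List Int)) (link_order : List String), Dom_build_unique_names_and_primary_map_py link_to_unique link_order → Spec_build_unique_names_and_primary_map_py link_to_unique link_order (build_unique_names_and_primary_map_py link_to_unique link_order)

-- ===== LEMMAS AND PROOFS =====

-- A's inner candidate-append step and B's inner best/prim update step
def pvStepA (lk : String) (d : PySem.Dict Int (List String)) (u : Int) : PySem.Dict Int (List String) :=
  d.modify u [] (· ++ [lk])

def pvStepB (lk : String) (bp : PySem.Dict Int Int × PySem.Dict Int String) (u : Int) :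
    PySem.Dict Int Int × PySem.Dict Int String :=
  match bp.1.get? u with
  | none => (bp.1.insert u (pvSufPriority lk), bp.2.insert u lk)
  | some b0 => if pvSufPriority lk < b0 then (bp.1.insert u (pvSufPriority lk), bp.2.insert u lk) else bp

-- the relation the two loops maintain between A's candidate lists and B's (best, prim) dicts
def pvInv (d : PySem.Dict Int (List String)) (bp : PySem.Dict Int Int × PySem.Dict Int String) : Prop :=
  ∀ u : Int,
    (d.contains u = false ∧ bp.1.get? u = none ∧ bp.2.get? u = none) ∨
    (∃ m, d.contains u = true ∧ PySem.List.min? (d.getD u []) pvSufPriority = some m ∧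
      bp.1.get? u = some (pvSufPriority m) ∧ bp.2.get? u = some m)

-- min of an appended candidate: ties keep the earlier element, a strictly smaller key replaces it
lemma pv_min?_append_singleton {α κ : Type} [LT κ] [DecidableLT κ] (cs : List α) (x : α) (key : α → κ) :
    PySem.List.min? (cs ++ [x]) key =
      match PySem.List.min? cs key with
      | none => some x
      | some m => if key x < key m then some x else some m := by
  have hfold : ∀ (r : Option α),
      List.foldl (fun acc x => match acc with
        | none => some x
        | some m => if key x < key m then some x else some m) r [x]
      = (match r with | none => some x | some m => if key x < key m then some x else some m) := by
    intro r; rfl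
  simp only [PySem.List.min?, List.foldl_append]
  exact hfold _

lemma pvInv_step (lk : String) (u0 : Int) (d : PySem.Dict Int (List String))
    (bp : PySem.Dict Int Int × PySem.Dict Int String) (h : pvInv d bp) :
    pvInv (pvStepA lk d u0) (pvStepB lk bp u0) := by
  intro u
  by_cases hu : u = u0
  · subst hu
    rcases h u with ⟨h1, h2, h3⟩ | ⟨m, h1, h2, h3, h4⟩
    · have hnil : d.getD u [] = [] := PySem.Dict.getD_of_not_contains d [] h1
      right
      refine ⟨lk, ?_, ?_, ?_, ?_⟩ <;>
        simp [pvStepA, pvStepB, h2, PySem.Dict.contains_modify,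
          PySem.Dict.getD_modify_self, hnil,
          PySem.Dict.get?_insert_self, PySem.List.min?]
    · right
      by_cases hlt : pvSufPriority lk < pvSufPriority m
      · refine ⟨lk, ?_, ?_, ?_, ?_⟩ <;>
          simp [pvStepA, pvStepB, hlt, PySem.Dict.contains_modify,
            PySem.Dict.getD_modify_self, pv_min?_append_singleton, h2, h3,
            PySem.Dict.get?_insert_self]
      · refine ⟨m, ?_, ?_, ?_, ?_⟩ <;>
          simp [pvStepA, pvStepB, hlt, PySem.Dict.contains_modify,
            PySem.Dict.getD_modify_self, pv_min?_append_singleton, h2, h3, h4]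
  · have hcont : (pvStepA lk d u0).contains u = d.contains u := by
      simp [pvStepA, PySem.Dict.contains_modify, hu]
    have hgetD : (pvStepA lk d u0).getD u [] = d.getD u [] :=
      PySem.Dict.getD_modify_of_ne d [] (· ++ [lk]) hu
    have hb : (pvStepB lk bp u0).1.get? u = bp.1.get? u ∧ (pvStepB lk bp u0).2.get? u = bp.2.get? u := by
      rcases hb0 : bp.1.get? u0 with _ | b0
      · constructor <;> simp [pvStepB, hb0, PySem.Dict.get?_insert_of_ne, hu]
      · by_cases hlt : pvSufPriority lk < b0 <;>
          constructor <;> simp [pvStepB, hb0, hlt, PySem.Dict.get?_insert_of_ne, hu]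
    rcases h u with ⟨h1, h2, h3⟩ | ⟨m, h1, h2, h3, h4⟩
    · exact Or.inl ⟨hcont ▸ h1, hb.1 ▸ h2, hb.2 ▸ h3⟩
    · exact Or.inr ⟨m, hcont ▸ h1, hgetD ▸ h2, hb.1 ▸ h3, hb.2 ▸ h4⟩

lemma pvInv_fold_inner (lk : String) (idxs : List Int) :
    ∀ d bp, pvInv d bp → pvInv (idxs.foldl (pvStepA lk) d) (idxs.foldl (pvStepB lk) bp) := by
  induction idxs with
  | nil => intro d bp h; exact h
  | cons x t ih => intro d bp h; exact ih _ _ (pvInv_step lk x d bp h)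

lemma pvInv_fold_outer (l : List (String × List Int)) :
    ∀ d bp, pvInv d bp →
      pvInv (l.foldl (fun d p => p.2.foldl (pvStepA p.1) d) d)
            (l.foldl (fun bp p => p.2.foldl (pvStepB p.1) bp) bp) := by
  induction l with
  | nil => intro d bp h; exact h
  | cons x t ih => intro d bp h; exact ih _ _ (pvInv_fold_inner x.1 x.2 d bp h)

lemma pvInv_empty : pvInv PySem.Dict.empty (PySem.Dict.empty, PySem.Dict.empty) := by
  intro u
  exact Or.inl ⟨PySem.Dict.contains_empty u, PySem.Dict.get?_empty u, PySem.Dict.get?_empty u⟩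

-- A's primary-building loop yields exactly the association list B's comprehension builds
lemma pv_primary_items (utl : PySem.Dict Int (List String))
    (bF : PySem.Dict Int Int) (pF : PySem.Dict Int String) (hinv : pvInv utl (bF, pF)) :
    ∀ (xs : List Int), xs.Nodup → ∀ (pr : PySem.Dict Int String),
      (∀ u ∈ xs, pr.contains u = false) →
      (xs.foldl (fun pr u =>
          if utl.getD u [] = [] then pr.insert u "unknown"
          else pr.insert u ((PySem.List.min? (utl.getD u []) pvSufPriority).getD "unknown")) pr).items
        = pr.items ++ xs.map (fun u => (u, pF.getD u "unknown")) := by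
  intro xs
  induction xs with
  | nil => intro _ pr _; simp
  | cons x t ih =>
    intro hnd pr hfresh
    have hval : (if utl.getD x [] = [] then pr.insert x "unknown"
        else pr.insert x ((PySem.List.min? (utl.getD x []) pvSufPriority).getD "unknown"))
        = pr.insert x (pF.getD x "unknown") := by
      rcases hinv x with ⟨h1, _, h3⟩ | ⟨m, h1, h2, h3, h4⟩
      · have h3' : pF.get? x = none := h3
        have hc : utl.getD x [] = [] := PySem.Dict.getD_of_not_contains utl [] h1
        rw [hc, if_pos rfl, PySem.Dict.getD_eq_get?_getD, h3']
        rfl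
      · have h4' : pF.get? x = some m := h4
        have hne : utl.getD x [] ≠ [] := by
          intro hnil; rw [hnil] at h2; simp [PySem.List.min?] at h2
        rw [if_neg hne, h2, PySem.Dict.getD_eq_get?_getD, h4']
    have hfresh' : ∀ u ∈ t, (pr.insert x (pF.getD x "unknown")).contains u = false := by
      intro u hu
      have hux : u ≠ x := fun hh => (List.nodup_cons.mp hnd).1 (hh ▸ hu)
      rw [← PySem.Dict.get?_eq_none_iff_contains, PySem.Dict.get?_insert_of_ne _ _ hux,
        PySem.Dict.get?_eq_none_iff_contains]
      exact hfresh u (List.mem_cons_of_mem _ hu)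
    rw [List.foldl_cons, hval, ih (List.Nodup.of_cons hnd) _ hfresh',
      PySem.Dict.items_insert_of_not_contains pr _ (hfresh x (by simp))]
    simp

-- the Option-buffer names loop is the plain names loop with 'some' mapped over the output
lemma pv_names_opt {γ : Type} (f1 : γ → Int → String) (f2 : γ → Int → γ) :
    ∀ (xs : List Int) (acc : List String) (c : γ),
      xs.foldl (fun (st : List (Option String) × γ) u => (st.1 ++ [some (f1 st.2 u)], f2 st.2 u)) (acc.map some, c)
        = (((xs.foldl (fun (st : List String × γ) u => (st.1 ++ [f1 st.2 u], f2 st.2 u)) (acc, c)).1).map some,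
           (xs.foldl (fun (st : List String × γ) u => (st.1 ++ [f1 st.2 u], f2 st.2 u)) (acc, c)).2) := by
  intro xs
  induction xs with
  | nil => intro acc c; rfl
  | cons x t ih =>
    intro acc c
    simp only [List.foldl_cons]
    have hmap : (acc.map some) ++ [some (f1 c x)] = (acc ++ [f1 c x]).map some := by simp
    rw [hmap, ih]

lemma pv_names_opt_nil {γ : Type} (f1 : γ → Int → String) (f2 : γ → Int → γ) (xs : List Int) (c : γ) :
    xs.foldl (fun (st : List (Option String) × γ) u => (st.1 ++ [some (f1 st.2 u)], f2 st.2 u)) ([], c)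
      = (((xs.foldl (fun (st : List String × γ) u => (st.1 ++ [f1 st.2 u], f2 st.2 u)) ([], c)).1).map some,
         (xs.foldl (fun (st : List String × γ) u => (st.1 ++ [f1 st.2 u], f2 st.2 u)) ([], c)).2) := by
  simpa using pv_names_opt f1 f2 xs [] c

lemma pv_enum_unwrap (l : List String) :
    ∀ s : Int, (PySem.List.enumerate (l.map some) s).map
        (fun p => match p.2 with | some n => n | none => "u" ++ PySem.Int.toStr p.1) = l := by
  induction l with
  | nil => intro s; rfl
  | cons x t ih => intro s; simp only [List.map_cons, PySem.List.enumerate_cons, List.map_cons, ih]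

-- ===== VERDICT (by name: the statement is the Claim_ definition above) =====
theorem build_unique_names_and_primary_map_py_spec : Claim_equal_build_unique_names_and_primary_map_py := by
  intro ltu lo _
  unfold Spec_build_unique_names_and_primary_map_py
  by_cases h : ltu = []
  · simp [build_unique_names_and_primary_map_py, build_unique_names_and_primary_map_py_alt, h]
  · simp only [build_unique_names_and_primary_map_py, build_unique_names_and_primary_map_py_alt,
      if_neg h]
    rw [PySem.List.foldl_prod_mk
      (f := fun N (p : String × List Int) => if p.2 = [] then N else max N (pvMaxOf p.2 + 1))
      (g := fun (bp : PySem.Dict Int Int × PySem.Dict Int String) (p : String × List Int) =>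
        List.foldl (fun (bp : PySem.Dict Int Int × PySem.Dict Int String) (u : Int) =>
          match bp.1.get? u with
          | none => (bp.1.insert u (pvSufPriority p.1), bp.2.insert u p.1)
          | some b0 => if pvSufPriority p.1 < b0 then
              (bp.1.insert u (pvSufPriority p.1), bp.2.insert u p.1) else bp) bp p.2)]
    dsimp only
    generalize hNg : List.foldl
      (fun (N : Int) (p : String × List Int) => if p.2 = [] then N else max N (pvMaxOf p.2 + 1)) 0 ltu = N
    generalize hG : List.foldl
      (fun (bp : PySem.Dict Int Int × PySem.Dict Int String) (p : String × List Int) =>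
        List.foldl (fun (bp : PySem.Dict Int Int × PySem.Dict Int String) (u : Int) =>
          match bp.1.get? u with
          | none => (bp.1.insert u (pvSufPriority p.1), bp.2.insert u p.1)
          | some b0 => if pvSufPriority p.1 < b0 then
              (bp.1.insert u (pvSufPriority p.1), bp.2.insert u p.1) else bp) bp p.2)
      (PySem.Dict.empty, PySem.Dict.empty) ltu = bpF
    generalize hU : List.foldl
      (fun (d : PySem.Dict Int (List String)) (p : String × List Int) =>
        List.foldl (fun (d : PySem.Dict Int (List String)) (u : Int) =>
          d.modify u [] (· ++ [p.1])) d p.2)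
      PySem.Dict.empty ltu = utl
    have hinv : pvInv utl bpF := by
      rw [← hU, ← hG]
      exact pvInv_fold_outer ltu _ _ pvInv_empty
    have hP : (List.foldl (fun (pr : PySem.Dict Int String) (u : Int) =>
          if utl.getD u [] = [] then pr.insert u "unknown"
          else pr.insert u ((PySem.List.min? (utl.getD u []) pvSufPriority).getD "unknown"))
          PySem.Dict.empty (PySem.List.pyRange 0 N 1))
        = PySem.Dict.mk (List.map (fun u => (u, bpF.2.getD u "unknown")) (PySem.List.pyRange 0 N 1)) := by
      apply PySem.Dict.ext
      have := pv_primary_items utl bpF.1 bpF.2 hinv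
        (PySem.List.pyRange 0 N 1) (PySem.List.nodup_pyRange_one 0 N) PySem.Dict.empty
        (fun u _ => PySem.Dict.contains_empty u)
      simpa using this
    rw [hP]
    generalize hPg : PySem.Dict.mk
      (List.map (fun u => (u, bpF.2.getD u "unknown")) (PySem.List.pyRange 0 N 1)) = P
    rw [pv_names_opt_nil
        (f1 := fun (c : PySem.Dict String Int) (u : Int) =>
          P.getD u "unknown" ++ "_" ++ PySem.Int.toStr (c.getD (P.getD u "unknown") 0))
        (f2 := fun (c : PySem.Dict String Int) (u : Int) =>
          c.insert (P.getD u "unknown") (c.getD (P.getD u "unknown") 0 + 1)),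
      pv_enum_unwrap]
    subst hPg
    rfl
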